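-- pv_equiv track=rewrite | github.com/Tokosvereb/progtetelek_listakkal | feladatok.py | nyolcadikfeladat
-- ===== SOURCE A (Python) =====
-- def nyolcadikfeladat(szam_lista):
--     minertek = 0
--     maxertek = 0
--     for i in range(0,len(szam_lista),1):
--         if minertek > szam_lista [i]:
--             minertek = szam_lista[i]
--         if maxertek < szam_lista[i]:
--             maxertek = szam_lista[i]
--     kivonas = minertek - maxertek
--
--     return kivonas
-- ===== SOURCE B (Python) =====
-- def nyolcadikfeladat(szam_lista):
--     if not szam_lista:
--         return 0
--     s = sorted(szam_lista)
--     return min(0, s[0]) - max(0, s[-1])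
-- ===== Notes on version B (the rewrite author's own statement) =====
-- stated objective: alternative
-- what changed: Replaces the fused index loop tracking two running extremes with a sort-then-endpoints algorithm: sort the list once and read the minimum and maximum off its first and last elements, clamped against the 0 seed.
import Mathlib
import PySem

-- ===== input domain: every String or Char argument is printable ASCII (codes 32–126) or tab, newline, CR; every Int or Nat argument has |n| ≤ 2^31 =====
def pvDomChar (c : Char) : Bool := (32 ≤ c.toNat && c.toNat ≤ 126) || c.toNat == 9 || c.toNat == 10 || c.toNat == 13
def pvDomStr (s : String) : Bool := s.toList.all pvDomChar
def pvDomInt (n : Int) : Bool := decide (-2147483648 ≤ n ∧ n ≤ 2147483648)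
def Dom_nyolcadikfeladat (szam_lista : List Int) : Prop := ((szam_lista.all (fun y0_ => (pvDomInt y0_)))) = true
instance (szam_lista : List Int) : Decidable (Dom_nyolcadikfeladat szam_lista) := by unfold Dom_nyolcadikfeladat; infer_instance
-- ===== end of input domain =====

-- B replaces A's fused running-extremes loop with sort-then-endpoints: sort once, read min/max from the ends, clamp with the 0 seed; alternative algorithm, same result.

-- ===== PORT A =====
-- fused loop over indices, maintaining (minertek, maxertek), both seeded at 0
def nyolcadikfeladat (szam_lista : List Int) : Int :=
  let st := (PySem.List.pyRange 0 szam_lista.length 1).foldl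
    (fun (p : Int × Int) i =>
      (if p.1 > PySem.List.pyGetD szam_lista i 0 then PySem.List.pyGetD szam_lista i 0 else p.1,
       if p.2 < PySem.List.pyGetD szam_lista i 0 then PySem.List.pyGetD szam_lista i 0 else p.2))
    ((0 : Int), (0 : Int))
  st.1 - st.2

-- ===== PORT B =====
-- if empty return 0; else s = sorted(lst); min(0, s[0]) - max(0, s[-1])
def nyolcadikfeladat_alt (szam_lista : List Int) : Int :=
  if szam_lista = [] then 0
  else
    let s := PySem.List.sorted szam_lista (fun y => y) false
    min 0 (PySem.List.pyGetD s 0 0) - max 0 (PySem.List.pyGetD s (-1) 0)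

-- ===== PRECONDITION & SPEC =====
def Spec_nyolcadikfeladat (szam_lista : List Int) (out : Int) : Prop := out = nyolcadikfeladat_alt szam_lista
instance (szam_lista : List Int) (out : Int) : Decidable (Spec_nyolcadikfeladat szam_lista out) := by unfold Spec_nyolcadikfeladat; infer_instance

-- ===== CLAIM =====
def Claim_equal_nyolcadikfeladat : Prop := ∀ (szam_lista : List Int), Dom_nyolcadikfeladat szam_lista → Spec_nyolcadikfeladat szam_lista (nyolcadikfeladat szam_lista)

-- ===== LEMMAS AND PROOFS =====

-- A's fused pair loop computes the running min and running max componentwise.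
theorem pv_pair_foldl (xs : List Int) (a b : Int) :
    xs.foldl (fun (p : Int × Int) v =>
      (if p.1 > v then v else p.1, if p.2 < v then v else p.2)) (a, b)
      = (xs.foldl min a, xs.foldl max b) := by
  induction xs generalizing a b with
  | nil => rfl
  | cons x t ih =>
      have h1 : (if a > x then x else a) = min a x := by
        simp only [min_def]; split_ifs <;> omega
      have h2 : (if b < x then x else b) = max b x := by
        simp only [max_def]; split_ifs <;> omega
      simp only [List.foldl_cons, ih, h1, h2]

theorem pv_foldl_min_const (xs : List Int) (b : Int) (h : ∀ y ∈ xs, b ≤ y) :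
    xs.foldl min b = b := by
  induction xs with
  | nil => rfl
  | cons x t ih =>
      have hb : min b x = b := min_eq_left (h x (by simp))
      simp only [List.foldl_cons, hb]
      exact ih (fun y hy => h y (by simp [hy]))

theorem pv_foldl_max_const (xs : List Int) (b : Int) (h : ∀ y ∈ xs, y ≤ b) :
    xs.foldl max b = b := by
  induction xs with
  | nil => rfl
  | cons x t ih =>
      have hb : max b x = b := max_eq_left (h x (by simp))
      simp only [List.foldl_cons, hb]
      exact ih (fun y hy => h y (by simp [hy]))

-- the fold of min over xs lands on the least element m of xs
theorem pv_foldl_min_of_mem (xs : List Int) (m : Int) (hm : m ∈ xs)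
    (hle : ∀ y ∈ xs, m ≤ y) : ∀ a, xs.foldl min a = min a m := by
  induction xs with
  | nil => cases hm
  | cons x t ih =>
      intro a
      rcases List.mem_cons.mp hm with rfl | hmt
      · simp only [List.foldl_cons]
        rw [pv_foldl_min_const t (min a m)
            (fun y hy => le_trans (min_le_right a m) (hle y (by simp [hy])))]
      · simp only [List.foldl_cons]
        rw [ih hmt (fun y hy => hle y (by simp [hy])) (min a x)]
        have hmx : m ≤ x := hle x (by simp)
        rw [min_assoc, min_eq_right hmx]

theorem pv_foldl_max_of_mem (xs : List Int) (m : Int) (hm : m ∈ xs)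
    (hle : ∀ y ∈ xs, y ≤ m) : ∀ a, xs.foldl max a = max a m := by
  induction xs with
  | nil => cases hm
  | cons x t ih =>
      intro a
      rcases List.mem_cons.mp hm with rfl | hmt
      · simp only [List.foldl_cons]
        rw [pv_foldl_max_const t (max a m)
            (fun y hy => le_trans (hle y (by simp [hy])) (le_max_right a m))]
      · simp only [List.foldl_cons]
        rw [ih hmt (fun y hy => hle y (by simp [hy])) (max a x)]
        have hmx : x ≤ m := hle x (by simp)
        rw [max_assoc, max_eq_right hmx]

-- in a (≤)-pairwise list every element is ≤ the last
theorem pv_pairwise_le_getLast (l : List Int) (hp : l.Pairwise (· ≤ ·)) (h : l ≠ []) :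
    ∀ y ∈ l, y ≤ l.getLast h := by
  induction l with
  | nil => cases h rfl
  | cons x t ih =>
      cases t with
      | nil => intro y hy; simp at hy; simp [hy]
      | cons z zs =>
          intro y hy
          have htne : (z :: zs) ≠ [] := by simp
          rw [List.getLast_cons htne]
          have hp' := (List.pairwise_cons.mp hp)
          rcases List.mem_cons.mp hy with rfl | hyt
          · exact le_trans (hp'.1 _ (List.getLast_mem htne)) (le_refl _)
          · exact ih hp'.2 htne y hyt

-- ===== VERDICT =====
theorem nyolcadikfeladat_spec : Claim_equal_nyolcadikfeladat := by
  intro xs _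
  show nyolcadikfeladat xs = nyolcadikfeladat_alt xs
  unfold nyolcadikfeladat nyolcadikfeladat_alt
  rw [PySem.List.foldl_pyRange_zero_pyGetD' xs 0
        (fun (p : Int × Int) v => (if p.1 > v then v else p.1, if p.2 < v then v else p.2))
        ((0 : Int), (0 : Int)),
      pv_pair_foldl]
  by_cases hxs : xs = []
  · subst hxs; rfl
  · simp only [if_neg hxs]
    set s := PySem.List.sorted xs (fun y => y) false with hs
    have hperm : s.Perm xs := PySem.List.sorted_perm ..
    have hsne : s ≠ [] := by
      intro h; exact hxs ((h ▸ hperm).symm.eq_nil)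
    obtain ⟨hd, tl, hcons⟩ := List.exists_cons_of_ne_nil hsne
    have hhd_le : ∀ y ∈ xs, hd ≤ y := by
      have := PySem.List.key_head_sorted_le (xs := xs) (key := fun y => y) (hs ▸ hcons)
      simpa using this
    have hhd_mem : hd ∈ xs := hperm.mem_iff.mp (by simp [hcons])
    have hlast_mem : s.getLast hsne ∈ xs := hperm.mem_iff.mp (List.getLast_mem hsne)
    have hpair : s.Pairwise (· ≤ ·) := by
      have := PySem.List.sorted_pairwise (xs := xs) (key := fun y => y)
      simpa [hs] using this
    have hlast_ge : ∀ y ∈ xs, y ≤ s.getLast hsne := by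
      intro y hy
      exact pv_pairwise_le_getLast s hpair hsne y (hperm.mem_iff.mpr hy)
    rw [pv_foldl_min_of_mem xs hd hhd_mem hhd_le 0,
        pv_foldl_max_of_mem xs (s.getLast hsne) hlast_mem hlast_ge 0]
    rw [PySem.List.pyGetD_neg_one (h := hsne)]
    simp [hcons]
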